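-- pv_equiv track=rewrite | github.com/janvanwassenhove/mITyStudio | backend/app/services/sample_service.py | _auto_categorize
-- ===== SOURCE A (Python) =====
-- def _auto_categorize(filename: str) -> str:
--     """Auto-categorize sample based on filename"""
--     filename_lower = filename.lower()
--
--     if any(keyword in filename_lower for keyword in ['kick', 'bass', 'sub']):
--         return 'bass'
--     elif any(keyword in filename_lower for keyword in ['drum', 'snare', 'hat', 'cymbal']):
--         return 'drums'
--     elif any(keyword in filename_lower for keyword in ['vocal', 'voice', 'sung']):
--         return 'vocals'
--     elif any(keyword in filename_lower for keyword in ['loop', 'phrase']):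
--         return 'loops'
--     elif any(keyword in filename_lower for keyword in ['fx', 'effect', 'sweep', 'rise']):
--         return 'fx'
--     elif any(keyword in filename_lower for keyword in ['lead', 'synth', 'pluck', 'chord']):
--         return 'melodic'
--     elif any(keyword in filename_lower for keyword in ['perc', 'shaker', 'clap']):
--         return 'percussion'
--     elif any(keyword in filename_lower for keyword in ['ambient', 'pad', 'texture']):
--         return 'ambient'
--     elif any(keyword in filename_lower for keyword in ['one', 'shot', 'hit']):
--         return 'oneshots'
--     else:
--         return 'uncategorized'
-- ===== SOURCE B (Python) =====
-- # Flat keyword->priority map; the answer is the minimum priority among all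
-- # keywords occurring in the lowercased filename (not a first-match cascade).
-- _KEYWORD_PRIORITY = {
--     'kick': 0, 'bass': 0, 'sub': 0,
--     'drum': 1, 'snare': 1, 'hat': 1, 'cymbal': 1,
--     'vocal': 2, 'voice': 2, 'sung': 2,
--     'loop': 3, 'phrase': 3,
--     'fx': 4, 'effect': 4, 'sweep': 4, 'rise': 4,
--     'lead': 5, 'synth': 5, 'pluck': 5, 'chord': 5,
--     'perc': 6, 'shaker': 6, 'clap': 6,
--     'ambient': 7, 'pad': 7, 'texture': 7,
--     'one': 8, 'shot': 8, 'hit': 8,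
-- }
--
-- _NAMES = ['bass', 'drums', 'vocals', 'loops', 'fx', 'melodic',
--           'percussion', 'ambient', 'oneshots', 'uncategorized']
--
--
-- def _auto_categorize(filename: str) -> str:
--     """Auto-categorize sample based on filename"""
--     fl = filename.lower()
--     best = 9
--     for kw, p in _KEYWORD_PRIORITY.items():
--         if kw in fl:
--             best = min(best, p)
--     return _NAMES[best]
-- ===== Notes on version B (the rewrite author's own statement) =====
-- stated objective: alternative
-- what changed: Replaces the grouped first-match if/elif cascade by a flat keyword-to-priority map: B checks every keyword, keeps the minimum priority found, and indexes a name table with it, instead of short-circuiting category by category.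
import Mathlib
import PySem

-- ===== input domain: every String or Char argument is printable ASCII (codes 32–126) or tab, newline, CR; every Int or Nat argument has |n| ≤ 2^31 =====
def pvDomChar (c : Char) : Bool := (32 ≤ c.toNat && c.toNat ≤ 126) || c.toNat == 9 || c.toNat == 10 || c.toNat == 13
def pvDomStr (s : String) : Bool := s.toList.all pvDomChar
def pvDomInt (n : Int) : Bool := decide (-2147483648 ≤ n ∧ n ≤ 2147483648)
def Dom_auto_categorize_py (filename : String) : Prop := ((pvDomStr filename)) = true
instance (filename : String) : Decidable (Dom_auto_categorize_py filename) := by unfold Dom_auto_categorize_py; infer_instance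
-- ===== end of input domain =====

-- B replaces A's grouped first-match if/elif cascade by a flat keyword->priority map
-- scanned with a running minimum, then a name-table lookup (alternative decomposition).


-- ===== PORT A =====
def auto_categorize_py (filename : String) : String :=
  let filename_lower := PySem.Str.lower filename
  if ["kick", "bass", "sub"].any (fun k => PySem.Str.isIn k filename_lower) then "bass"
  else if ["drum", "snare", "hat", "cymbal"].any (fun k => PySem.Str.isIn k filename_lower) then "drums"
  else if ["vocal", "voice", "sung"].any (fun k => PySem.Str.isIn k filename_lower) then "vocals"
  else if ["loop", "phrase"].any (fun k => PySem.Str.isIn k filename_lower) then "loops"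
  else if ["fx", "effect", "sweep", "rise"].any (fun k => PySem.Str.isIn k filename_lower) then "fx"
  else if ["lead", "synth", "pluck", "chord"].any (fun k => PySem.Str.isIn k filename_lower) then "melodic"
  else if ["perc", "shaker", "clap"].any (fun k => PySem.Str.isIn k filename_lower) then "percussion"
  else if ["ambient", "pad", "texture"].any (fun k => PySem.Str.isIn k filename_lower) then "ambient"
  else if ["one", "shot", "hit"].any (fun k => PySem.Str.isIn k filename_lower) then "oneshots"
  else "uncategorized"

-- ===== PORT B =====
-- flat keyword -> priority map (dict in insertion order = this list)
def pvKeywordPriority : List (String × Int) :=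
  [("kick", 0), ("bass", 0), ("sub", 0),
   ("drum", 1), ("snare", 1), ("hat", 1), ("cymbal", 1),
   ("vocal", 2), ("voice", 2), ("sung", 2),
   ("loop", 3), ("phrase", 3),
   ("fx", 4), ("effect", 4), ("sweep", 4), ("rise", 4),
   ("lead", 5), ("synth", 5), ("pluck", 5), ("chord", 5),
   ("perc", 6), ("shaker", 6), ("clap", 6),
   ("ambient", 7), ("pad", 7), ("texture", 7),
   ("one", 8), ("shot", 8), ("hit", 8)]

def pvNames : List String :=
  ["bass", "drums", "vocals", "loops", "fx", "melodic",
   "percussion", "ambient", "oneshots", "uncategorized"]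

-- the loop body of Source B: if kw in fl: best = min(best, p)
def pvStep (fl : String) (m : Int) (kp : String × Int) : Int :=
  if PySem.Str.isIn kp.1 fl then min m kp.2 else m

def auto_categorize_py_alt (filename : String) : String :=
  let fl := PySem.Str.lower filename
  let best := pvKeywordPriority.foldl (pvStep fl) 9
  -- _NAMES[best]; best is always in [0,9] so the getD default is never used
  (PySem.List.pyGet? pvNames best).getD ""

-- ===== PRECONDITION & SPEC =====
def Spec_auto_categorize_py (filename : String) (out : String) : Prop := out = auto_categorize_py_alt filename
instance (filename : String) (out : String) : Decidable (Spec_auto_categorize_py filename out) := by unfold Spec_auto_categorize_py; infer_instance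

-- ===== CLAIM =====
def Claim_equal_auto_categorize_py : Prop := ∀ (filename : String), Dom_auto_categorize_py filename → Spec_auto_categorize_py filename (auto_categorize_py filename)

-- ===== LEMMAS AND PROOFS =====

-- if e then min m p else m, shared so rewriting does not duplicate the accumulator term
def pvUpd (e : Bool) (p m : Int) : Int := if e then min m p else m

-- folding a same-priority block updates the running min iff some keyword of the block occurs
theorem pv_blk2 (fl k1 k2 : String) (p m : Int) :
    List.foldl (pvStep fl) m [(k1, p), (k2, p)] =
      pvUpd (PySem.Str.isIn k1 fl || PySem.Str.isIn k2 fl) p m := by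
  simp only [List.foldl, pvStep, pvUpd]
  cases PySem.Str.isIn k1 fl <;> cases PySem.Str.isIn k2 fl <;> simp

theorem pv_blk3 (fl k1 k2 k3 : String) (p m : Int) :
    List.foldl (pvStep fl) m [(k1, p), (k2, p), (k3, p)] =
      pvUpd (PySem.Str.isIn k1 fl || (PySem.Str.isIn k2 fl || PySem.Str.isIn k3 fl)) p m := by
  simp only [List.foldl, pvStep, pvUpd]
  cases PySem.Str.isIn k1 fl <;> cases PySem.Str.isIn k2 fl <;> cases PySem.Str.isIn k3 fl <;> simp

theorem pv_blk4 (fl k1 k2 k3 k4 : String) (p m : Int) :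
    List.foldl (pvStep fl) m [(k1, p), (k2, p), (k3, p), (k4, p)] =
      pvUpd (PySem.Str.isIn k1 fl || (PySem.Str.isIn k2 fl || (PySem.Str.isIn k3 fl ||
             PySem.Str.isIn k4 fl))) p m := by
  simp only [List.foldl, pvStep, pvUpd]
  cases PySem.Str.isIn k1 fl <;> cases PySem.Str.isIn k2 fl <;> cases PySem.Str.isIn k3 fl <;>
    cases PySem.Str.isIn k4 fl <;> simp

-- A's cascade and B's table lookup agree for every assignment of the nine block booleans
theorem pv_combine (e1 e2 e3 e4 e5 e6 e7 e8 e9 : Bool) :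
    (if e1 then "bass" else if e2 then "drums" else if e3 then "vocals" else
     if e4 then "loops" else if e5 then "fx" else if e6 then "melodic" else
     if e7 then "percussion" else if e8 then "ambient" else if e9 then "oneshots"
     else "uncategorized") =
    (PySem.List.pyGet? pvNames
      (pvUpd e9 8 (pvUpd e8 7 (pvUpd e7 6 (pvUpd e6 5 (pvUpd e5 4 (pvUpd e4 3
        (pvUpd e3 2 (pvUpd e2 1 (pvUpd e1 0 9)))))))))).getD "" := by
  cases e1 <;> cases e2 <;> cases e3 <;> cases e4 <;> cases e5 <;> cases e6 <;>
    cases e7 <;> cases e8 <;> cases e9 <;> rfl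

-- ===== VERDICT =====
set_option maxHeartbeats 2000000 in
theorem auto_categorize_py_spec : Claim_equal_auto_categorize_py := by
  intro filename _
  unfold Spec_auto_categorize_py auto_categorize_py auto_categorize_py_alt
  rw [show pvKeywordPriority =
        [("kick", (0:Int)), ("bass", 0), ("sub", 0)] ++
        ([("drum", 1), ("snare", 1), ("hat", 1), ("cymbal", 1)] ++
        ([("vocal", 2), ("voice", 2), ("sung", 2)] ++
        ([("loop", 3), ("phrase", 3)] ++
        ([("fx", 4), ("effect", 4), ("sweep", 4), ("rise", 4)] ++
        ([("lead", 5), ("synth", 5), ("pluck", 5), ("chord", 5)] ++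
        ([("perc", 6), ("shaker", 6), ("clap", 6)] ++
        ([("ambient", 7), ("pad", 7), ("texture", 7)] ++
         [("one", 8), ("shot", 8), ("hit", 8)]))))))) from rfl]
  simp only [List.foldl_append, pv_blk2, pv_blk3, pv_blk4, List.any_cons, List.any_nil,
    Bool.or_false]
  exact pv_combine _ _ _ _ _ _ _ _ _
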